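-- pv_equiv track=rewrite | github.com/fapablazacl/OpenGL-Hpp | oglhpp/util.py | is_capitalized
-- ===== SOURCE A (Python) =====
-- def is_capitalized(value):
--     if value == '':
--         return False
--
--     state = 0   # 0: uppercase part. 1: lowercase part
--
--     for ch in value:
--         if state == 0:
--             if str.isupper(ch):
--                 state = 1
--             else:
--                 return False
--         elif state == 1:
--             if str.isupper(ch):
--                 continue
--             elif str.islower(ch):
--                 state = 2
--             else:
--                 return False
--         elif state == 2:
--             if not str.islower(ch):
--                 return False
--
--     return True
-- ===== SOURCE B (Python) =====
-- def is_capitalized(value):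
--     i = 0
--     while i < len(value) and value[i].isupper():
--         i += 1
--     return i > 0 and all(ch.islower() for ch in value[i:])
-- ===== Notes on version B (the rewrite author's own statement) =====
-- stated objective: simpler
-- what changed: Replaced the explicit three-state machine with a count-the-uppercase-prefix while loop followed by an all(islower) check on the remaining suffix, with no state variable.
import Mathlib
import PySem

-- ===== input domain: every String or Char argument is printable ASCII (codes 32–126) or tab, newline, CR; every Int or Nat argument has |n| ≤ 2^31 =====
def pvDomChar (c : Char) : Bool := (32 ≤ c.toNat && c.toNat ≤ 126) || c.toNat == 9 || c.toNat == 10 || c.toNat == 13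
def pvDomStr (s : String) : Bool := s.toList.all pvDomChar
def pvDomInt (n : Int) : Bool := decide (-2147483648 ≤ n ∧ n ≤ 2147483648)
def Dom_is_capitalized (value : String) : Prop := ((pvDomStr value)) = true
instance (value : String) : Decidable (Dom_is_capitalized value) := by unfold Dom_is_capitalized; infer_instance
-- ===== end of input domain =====

-- B replaces A's explicit three-state machine by counting the uppercase prefix and
-- then checking the suffix is all lowercase (objective: simpler decomposition).

-- ===== PORT A =====
-- the for-loop over the characters with the integer state variable
def isCapLoopA : List Char → Int → Bool
  | [], _ => true
  | ch :: rest, state =>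
    if state == 0 then
      if PySem.Chars.isupper ch then isCapLoopA rest 1 else false
    else if state == 1 then
      if PySem.Chars.isupper ch then isCapLoopA rest 1
      else if PySem.Chars.islower ch then isCapLoopA rest 2
      else false
    else
      if !(PySem.Chars.islower ch) then false else isCapLoopA rest state

def is_capitalized (value : String) : Bool :=
  if value == "" then false
  else isCapLoopA value.toList 0

-- ===== PORT B =====
-- the while loop advancing i while value[i].isupper()
def upperPrefixLen : List Char → Nat
  | [] => 0
  | c :: rest => if PySem.Chars.isupper c then 1 + upperPrefixLen rest else 0

def is_capitalized_alt (value : String) : Bool :=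
  let i := upperPrefixLen value.toList
  decide (i > 0) && (value.toList.drop i).all (fun ch => PySem.Chars.islower ch)

-- ===== PRECONDITION & SPEC =====
def Spec_is_capitalized (value : String) (out : Bool) : Prop := out = is_capitalized_alt value
instance (value : String) (out : Bool) : Decidable (Spec_is_capitalized value out) := by unfold Spec_is_capitalized; infer_instance

-- ===== CLAIM (what is proved, stated in full; the proofs are below) =====
def Claim_equal_is_capitalized : Prop := ∀ (value : String), Dom_is_capitalized value → Spec_is_capitalized value (is_capitalized value)

-- ===== LEMMAS AND PROOFS =====
theorem isCapLoopA_two (l : List Char) :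
    isCapLoopA l 2 = l.all (fun ch => PySem.Chars.islower ch) := by
  induction l with
  | nil => rfl
  | cons c rest ih =>
    simp only [isCapLoopA, List.all_cons]
    by_cases h : PySem.Chars.islower c <;> simp [h, ih]

theorem isCapLoopA_one (l : List Char) :
    isCapLoopA l 1 = (l.drop (upperPrefixLen l)).all (fun ch => PySem.Chars.islower ch) := by
  induction l with
  | nil => rfl
  | cons c rest ih =>
    simp only [isCapLoopA, upperPrefixLen]
    by_cases hu : PySem.Chars.isupper c
    · simp [hu, ih, Nat.add_comm 1 (upperPrefixLen rest)]
    · by_cases hl : PySem.Chars.islower c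
      · simp [hu, hl, isCapLoopA_two]
      · simp [hu, hl]

-- ===== VERDICT (by name: the statement is the Claim_ definition above) =====
theorem is_capitalized_spec : Claim_equal_is_capitalized := by
  intro value _
  show is_capitalized value = is_capitalized_alt value
  unfold is_capitalized is_capitalized_alt
  by_cases he : value = ""
  · subst he; rfl
  · rw [if_neg (by simpa using he)]
    have hne : value.toList ≠ [] := by
      simpa using he
    obtain ⟨c, rest, hcr⟩ := List.exists_cons_of_ne_nil hne
    rw [hcr]
    simp only [isCapLoopA, upperPrefixLen]
    by_cases hu : PySem.Chars.isupper c
    · simp [hu, isCapLoopA_one, Nat.add_comm 1 (upperPrefixLen rest), he]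
    · simp [hu]
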